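-- pv_equiv track=rewrite | github.com/mattfrances/COMP472_Mini_Project_2 | calculations_helpers.py | calculate_evaluations_by_depth
-- ===== SOURCE A (Python) =====
-- def calculate_evaluations_by_depth(heuristic_data_for_all_moves):
--   evaluations_by_depth = []
--
--   for turn in range(len(heuristic_data_for_all_moves)):
--     for heuristic_evaluation in range(len(heuristic_data_for_all_moves[turn])):
--       if(heuristic_evaluation == len(evaluations_by_depth)):
--         evaluations_by_depth.append(heuristic_data_for_all_moves[turn][heuristic_evaluation])
--       else:
--         evaluations_by_depth[heuristic_evaluation] += heuristic_data_for_all_moves[turn][heuristic_evaluation]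
--
--   return evaluations_by_depth
-- ===== SOURCE B (Python) =====
-- def calculate_evaluations_by_depth(heuristic_data_for_all_moves):
--     width = max(map(len, heuristic_data_for_all_moves), default=0)
--     return [sum(row[depth] for row in heuristic_data_for_all_moves if depth < len(row))
--             for depth in range(width)]
-- ===== Notes on version B (the rewrite author's own statement) =====
-- stated objective: alternative
-- what changed: Replaces A's row-major accumulate-and-grow pass (append on first occurrence, in-place += afterwards) with a column-wise decomposition: compute the max row length once, then build the result as one independent column sum per depth.
import Mathlib
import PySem

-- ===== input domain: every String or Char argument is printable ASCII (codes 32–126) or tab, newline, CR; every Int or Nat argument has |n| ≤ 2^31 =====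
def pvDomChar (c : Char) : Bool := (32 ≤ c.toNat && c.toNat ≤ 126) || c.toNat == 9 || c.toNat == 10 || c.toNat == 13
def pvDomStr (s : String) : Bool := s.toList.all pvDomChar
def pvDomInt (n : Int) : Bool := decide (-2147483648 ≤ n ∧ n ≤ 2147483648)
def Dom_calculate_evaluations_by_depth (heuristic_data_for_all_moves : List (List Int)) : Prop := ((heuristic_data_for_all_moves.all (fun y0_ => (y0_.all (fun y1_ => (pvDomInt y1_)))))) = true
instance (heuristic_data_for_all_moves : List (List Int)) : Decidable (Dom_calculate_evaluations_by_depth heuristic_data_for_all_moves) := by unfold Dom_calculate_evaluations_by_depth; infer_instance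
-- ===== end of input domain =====

-- B sums each depth column independently after computing the max row length; A grows one
-- accumulator row-major.  Alternative decomposition, same exact results; A is total, so no Pre_.

-- ===== PORT A =====
-- one step of A's inner loop: append on first occurrence of this depth, else in-place +=
def pvStepA (row : List Int) (acc : List Int) (i : Nat) : List Int :=
  if i = acc.length then acc ++ [row.getD i 0]
  else acc.set i (acc.getD i 0 + row.getD i 0)

-- A's inner loop: for heuristic_evaluation in range(len(row))
def pvRowLoop (row : List Int) (acc : List Int) : List Int :=
  (List.range row.length).foldl (pvStepA row) acc

def calculate_evaluations_by_depth (heuristic_data_for_all_moves : List (List Int)) : List Int :=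
  (List.range heuristic_data_for_all_moves.length).foldl
    (fun ev turn => pvRowLoop (heuristic_data_for_all_moves.getD turn []) ev) []

-- ===== PORT B =====
-- sum(row[depth] for row in rows if depth < len(row))
def pvColSum (rows : List (List Int)) (depth : Nat) : Int :=
  ((rows.filter (fun r => decide (depth < r.length))).map (fun r => r.getD depth 0)).sum

def calculate_evaluations_by_depth_alt (heuristic_data_for_all_moves : List (List Int)) : List Int :=
  (List.range ((heuristic_data_for_all_moves.map List.length).foldl Nat.max 0)).map
    (pvColSum heuristic_data_for_all_moves)

-- ===== PRECONDITION & SPEC =====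
def Spec_calculate_evaluations_by_depth (heuristic_data_for_all_moves : List (List Int)) (out : List Int) : Prop := out = calculate_evaluations_by_depth_alt heuristic_data_for_all_moves
instance (heuristic_data_for_all_moves : List (List Int)) (out : List Int) : Decidable (Spec_calculate_evaluations_by_depth heuristic_data_for_all_moves out) := by unfold Spec_calculate_evaluations_by_depth; infer_instance

-- ===== CLAIM (what is proved, stated in full; the proofs are below) =====
def Claim_equal_calculate_evaluations_by_depth : Prop := ∀ (heuristic_data_for_all_moves : List (List Int)), Dom_calculate_evaluations_by_depth heuristic_data_for_all_moves → Spec_calculate_evaluations_by_depth heuristic_data_for_all_moves (calculate_evaluations_by_depth heuristic_data_for_all_moves)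

-- ===== LEMMAS AND PROOFS =====

lemma pv_getD_set (l : List Int) (n i : Nat) (a d : Int) (h : n < l.length) :
    (l.set n a).getD i d = if i = n then a else l.getD i d := by
  by_cases hi : i < l.length
  · rw [List.getD_eq_getElem _ _ (by simpa using hi), List.getD_eq_getElem _ _ hi,
      List.getElem_set]
    split_ifs with h1 h2 h2 <;> first | rfl | omega
  · rw [List.getD_eq_default _ _ (by simpa using Nat.le_of_not_lt hi),
      List.getD_eq_default _ _ (Nat.le_of_not_lt hi)]
    rw [if_neg (by omega)]

lemma pv_inner_len (row : List Int) (n : Nat) : ∀ (acc : List Int),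
    ((List.range n).foldl (pvStepA row) acc).length = Nat.max acc.length n := by
  induction n with
  | zero => intro acc; simp
  | succ n ih =>
    intro acc
    rw [List.range_succ, List.foldl_append, List.foldl_cons, List.foldl_nil]
    have hL := ih acc
    generalize hE : (List.range n).foldl (pvStepA row) acc = L at hL ⊢
    unfold pvStepA
    by_cases h : n = L.length
    · rw [if_pos h, List.length_append, List.length_cons, List.length_nil]
      simp only [Nat.max_def] at *; split_ifs at * <;> omega
    · rw [if_neg h, List.length_set]
      simp only [Nat.max_def] at *; split_ifs at * <;> omega

lemma pv_inner_getD (row : List Int) (n : Nat) : ∀ (acc : List Int) (i : Nat),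
    ((List.range n).foldl (pvStepA row) acc).getD i 0
      = acc.getD i 0 + (if i < n then row.getD i 0 else 0) := by
  induction n with
  | zero => intro acc i; simp
  | succ n ih =>
    intro acc i
    rw [List.range_succ, List.foldl_append, List.foldl_cons, List.foldl_nil]
    have hlen := pv_inner_len row n acc
    have hget := ih acc
    generalize hE : (List.range n).foldl (pvStepA row) acc = L at hlen hget ⊢
    have hf1 : acc.length ≤ L.length := by rw [hlen]; exact Nat.le_max_left _ _
    have hf2 : n ≤ L.length := by rw [hlen]; exact Nat.le_max_right _ _
    clear hlen
    unfold pvStepA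
    by_cases h : n = L.length
    · -- append branch: n = L.length, hence acc.length ≤ n
      rw [if_pos h]
      by_cases hi : i < n
      · rw [List.getD_append _ _ _ _ (by omega), hget, if_pos hi, if_pos (by omega)]
      · by_cases hie : i = n
        · subst hie
          rw [List.getD_append_right _ _ _ _ (by omega),
            show i - L.length = 0 by omega,
            List.getD_eq_default acc _ (by omega), if_pos (by omega)]
          simp
        · rw [List.getD_eq_default _ _ (by simp; omega),
            List.getD_eq_default acc _ (by omega), if_neg (by omega)]
          simp
    · -- set branch: n < L.length
      have hn : n < L.length := by omega
      rw [if_neg h, pv_getD_set _ _ _ _ _ hn]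
      by_cases hie : i = n
      · subst hie
        rw [if_pos rfl, hget, if_neg (by omega), if_pos (by omega)]
        ring
      · rw [if_neg hie, hget]
        by_cases hi : i < n
        · rw [if_pos hi, if_pos (by omega)]
        · rw [if_neg hi, if_neg (by omega)]

lemma pv_outer_as_foldl (rows : List (List Int)) : ∀ (acc : List Int),
    (List.range rows.length).foldl (fun ev turn => pvRowLoop (rows.getD turn []) ev) acc
      = rows.foldl (fun ev row => pvRowLoop row ev) acc := by
  induction rows with
  | nil => intro acc; simp
  | cons r rs ih =>
    intro acc
    rw [List.length_cons, List.range_succ_eq_map, List.foldl_cons, List.foldl_map,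
      List.foldl_cons]
    simpa using ih (pvRowLoop r acc)

lemma pv_outer_len (rows : List (List Int)) : ∀ (acc : List Int),
    (rows.foldl (fun ev row => pvRowLoop row ev) acc).length
      = (rows.map List.length).foldl Nat.max acc.length := by
  induction rows with
  | nil => intro acc; simp
  | cons r rs ih =>
    intro acc
    rw [List.foldl_cons, List.map_cons, List.foldl_cons, ih]
    unfold pvRowLoop
    rw [pv_inner_len]

lemma pv_outer_getD (rows : List (List Int)) : ∀ (acc : List Int) (i : Nat),
    (rows.foldl (fun ev row => pvRowLoop row ev) acc).getD i 0
      = acc.getD i 0 + (rows.map (fun r => r.getD i 0)).sum := by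
  induction rows with
  | nil => intro acc i; simp
  | cons r rs ih =>
    intro acc i
    rw [List.foldl_cons, ih, List.map_cons, List.sum_cons]
    unfold pvRowLoop
    rw [pv_inner_getD]
    by_cases hi : i < r.length
    · rw [if_pos hi]; ring
    · rw [if_neg hi, List.getD_eq_default _ _ (Nat.le_of_not_lt hi)]; ring

lemma pv_colSum_eq (rows : List (List Int)) (d : Nat) :
    pvColSum rows d = (rows.map (fun r => r.getD d 0)).sum := by
  unfold pvColSum
  induction rows with
  | nil => simp
  | cons r rs ih =>
    by_cases h : d < r.length
    · rw [List.filter_cons_of_pos (by simpa using h), List.map_cons, List.sum_cons,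
        List.map_cons, List.sum_cons, ih]
    · rw [List.filter_cons_of_neg (by simpa using h), List.map_cons, List.sum_cons, ih,
        List.getD_eq_default _ _ (Nat.le_of_not_lt h)]
      ring

-- ===== VERDICT (by name: the statement is the Claim_ definition above) =====
theorem calculate_evaluations_by_depth_spec : Claim_equal_calculate_evaluations_by_depth := by
  intro rows _
  unfold Spec_calculate_evaluations_by_depth calculate_evaluations_by_depth
    calculate_evaluations_by_depth_alt
  rw [pv_outer_as_foldl]
  apply List.ext_getElem
  · rw [pv_outer_len, List.length_map, List.length_range]
    simp
  · intro i h1 h2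
    rw [← List.getD_eq_getElem _ 0 h1, ← List.getD_eq_getElem _ 0 h2, pv_outer_getD]
    rw [List.getD_eq_getElem _ 0 h2, List.getElem_map, List.getElem_range, pv_colSum_eq]
    simp
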